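-- pv_equiv track=rewrite | github.com/martinvalentine/v-sign | src/vsign/data/vsl_preprocess_new.py | gloss_dict_update
-- ===== SOURCE A (Python) =====
-- def gloss_dict_update(total_dict, info_dict):
--     next_id = 1  # Start from 1, as 0 is reserved for the blank token
--     for k, v in info_dict.items():
--         if not isinstance(k, int):
--             continue
--
--         # Split the label by whitespace; if the label contains multiple tokens, count each separately
--         tokens = v['label'].split()
--         for token in tokens:
--             token = token.strip()
--             if not token:
--                 continue
--             if token not in total_dict:
--                 total_dict[token] = [next_id, 1]  # [Gloss ID, Occurrence Count]
--                 next_id += 1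
--             else:
--                 total_dict[token][1] += 1  # Increment occurrence count
--
--     return total_dict
-- ===== SOURCE B (Python) =====
-- def gloss_dict_update(total_dict, info_dict):
--     # Pass 1: count occurrences of each token, in first-appearance order.
--     counts = {}
--     for k, v in info_dict.items():
--         if not isinstance(k, int):
--             continue
--         for token in v['label'].split():
--             token = token.strip()
--             if token:
--                 counts[token] = counts.get(token, 0) + 1
--     # Pass 2: merge aggregated counts into total_dict (mutates it in place, like A).
--     next_id = 1
--     for token, c in counts.items():
--         if token in total_dict:
--             total_dict[token][1] += c
--         else:
--             total_dict[token] = [next_id, c]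
--             next_id += 1
--     return total_dict
-- ===== Notes on version B (the rewrite author's own statement) =====
-- stated objective: alternative
-- what changed: A updates total_dict and the running id once per token occurrence in a single interleaved loop; B first aggregates occurrence counts per distinct token in an ordered counter dict, then merges the counter into total_dict in one pass, adding the whole count at once and assigning ids per distinct new token.
import Mathlib
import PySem

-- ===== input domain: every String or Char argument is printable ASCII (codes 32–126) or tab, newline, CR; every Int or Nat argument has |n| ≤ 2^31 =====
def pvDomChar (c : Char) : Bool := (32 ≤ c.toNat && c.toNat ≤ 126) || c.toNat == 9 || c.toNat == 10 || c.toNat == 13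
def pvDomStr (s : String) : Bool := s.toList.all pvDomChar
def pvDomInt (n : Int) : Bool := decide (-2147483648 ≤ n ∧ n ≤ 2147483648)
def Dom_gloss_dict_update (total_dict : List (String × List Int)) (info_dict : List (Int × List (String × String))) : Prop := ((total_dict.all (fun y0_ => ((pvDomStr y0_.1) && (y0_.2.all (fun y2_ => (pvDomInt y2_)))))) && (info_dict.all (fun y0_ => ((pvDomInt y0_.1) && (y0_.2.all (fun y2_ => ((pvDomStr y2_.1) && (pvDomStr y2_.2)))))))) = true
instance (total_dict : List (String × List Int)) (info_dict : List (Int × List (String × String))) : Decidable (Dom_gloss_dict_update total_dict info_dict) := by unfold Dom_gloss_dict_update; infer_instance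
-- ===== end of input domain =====

-- B replaces A's single interleaved update loop by a counting pass plus a merge pass over
-- distinct tokens (objective: alternative decomposition, same cost). Both Pythons mutate
-- total_dict in place and return it; the equivalence proved here is about the return value.

-- Shared dict primitives over the association lists (Python dict: membership on keys,
-- new keys append, updates first-match in place).
def pvMem {α : Type} (t : String) (d : List (String × α)) : Bool := d.any (fun q => q.1 == t)
def pvModify {α : Type} (t : String) (f : α → α) : List (String × α) → List (String × α)
  | [] => []
  | q :: rest => if q.1 == t then (q.1, f q.2) :: rest else q :: pvModify t f rest
-- tokens of v['label'] (getD "": outside Pre_ Python raises KeyError, nothing is claimed there)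
def pvToks (v : List (String × String)) : List String :=
  PySem.Str.split₀ (PySem.Dict.getD ⟨v⟩ "label" "")

-- ===== PORT A =====
-- total_dict[token][1] += 1 (exact under Pre_: the value list has length ≥ 2 there)
def pvBump (l : List Int) : List Int := l.set 1 (l.getD 1 0 + 1)
def pvAStep (s : List (String × List Int) × Int) (tok : String) : List (String × List Int) × Int :=
  let t := PySem.Str.strip tok
  if t = "" then s
  else if pvMem t s.1 then (pvModify t pvBump s.1, s.2)
  else (s.1 ++ [(t, [s.2, 1])], s.2 + 1)

def gloss_dict_update (total_dict : List (String × List Int)) (info_dict : List (Int × List (String × String))) : List (String × List Int) :=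
  -- for k, v in info_dict.items(): (isinstance(k, int) always holds at this type) / inner token loop
  (info_dict.foldl (fun s p => (pvToks p.2).foldl pvAStep s) (total_dict, (1 : Int))).1

-- ===== PORT B =====
-- counts[token] = counts.get(token, 0) + 1
def pvCStep (c : List (String × Int)) (tok : String) : List (String × Int) :=
  let t := PySem.Str.strip tok
  if t = "" then c
  else if pvMem t c then pvModify t (· + 1) c else c ++ [(t, (1 : Int))]
-- total_dict[token][1] += c  (exact under Pre_, as in A)
def pvBumpBy (c : Int) (l : List Int) : List Int := l.set 1 (l.getD 1 0 + c)
def pvMStep (s : List (String × List Int) × Int) (e : String × Int) : List (String × List Int) × Int :=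
  if pvMem e.1 s.1 then (pvModify e.1 (pvBumpBy e.2) s.1, s.2)
  else (s.1 ++ [(e.1, [s.2, e.2])], s.2 + 1)

def gloss_dict_update_alt (total_dict : List (String × List Int)) (info_dict : List (Int × List (String × String))) : List (String × List Int) :=
  let counts : List (String × Int) :=
    info_dict.foldl (fun c p => (pvToks p.2).foldl pvCStep c) []
  (counts.foldl pvMStep (total_dict, (1 : Int))).1

-- ===== PRECONDITION & SPEC =====
-- the stripped nonempty tokens of all labels
def pvEffToks (info_dict : List (Int × List (String × String))) : List String :=
  ((info_dict.flatMap (fun p => pvToks p.2)).map PySem.Str.strip).filter (· ≠ "")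
-- Exactly the inputs on which A returns: every info value has a 'label' key (else KeyError),
-- and no total_dict key whose value list is shorter than 2 occurs among the label tokens
-- (else 'total_dict[token][1] += 1' raises IndexError).
def Pre_gloss_dict_update (total_dict : List (String × List Int)) (info_dict : List (Int × List (String × String))) : Prop :=
  (∀ p ∈ info_dict, pvMem "label" p.2 = true) ∧
  (∀ q ∈ total_dict, q.2.length < 2 → q.1 ∉ pvEffToks info_dict)
instance (total_dict : List (String × List Int)) (info_dict : List (Int × List (String × String))) : Decidable (Pre_gloss_dict_update total_dict info_dict) := by unfold Pre_gloss_dict_update; infer_instance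
def pvWitness_gloss_dict_update : (List (String × List Int)) × (List (Int × List (String × String))) :=
  ([("go", [3, 2])], [(0, [("label", "hi go hi")])])

def Spec_gloss_dict_update (total_dict : List (String × List Int)) (info_dict : List (Int × List (String × String))) (out : List (String × List Int)) : Prop := out = gloss_dict_update_alt total_dict info_dict
instance (total_dict : List (String × List Int)) (info_dict : List (Int × List (String × String))) (out : List (String × List Int)) : Decidable (Spec_gloss_dict_update total_dict info_dict out) := by unfold Spec_gloss_dict_update; infer_instance

-- ===== CLAIM (what is proved, stated in full; the proofs are below) =====
def Claim_equal_gloss_dict_update : Prop := ∀ (total_dict : List (String × List Int)) (info_dict : List (Int × List (String × String))), Dom_gloss_dict_update total_dict info_dict → Pre_gloss_dict_update total_dict info_dict → Spec_gloss_dict_update total_dict info_dict (gloss_dict_update total_dict info_dict)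

-- ===== LEMMAS AND PROOFS =====

-- nested loop = loop over the flattened token stream
theorem pv_foldl_nested {β : Type} (f : β → String → β) (l : List (Int × List (String × String))) (s : β) :
    l.foldl (fun s p => (pvToks p.2).foldl f s) s = (l.flatMap (fun p => pvToks p.2)).foldl f s := by
  induction l generalizing s with
  | nil => rfl
  | cons p rest ih => simp [List.flatMap_cons, List.foldl_append, ih]

theorem pvMem_modify {α : Type} (u t : String) (f : α → α) (d : List (String × α)) :
    pvMem u (pvModify t f d) = pvMem u d := by
  induction d with
  | nil => rfl
  | cons q rest ih =>
    by_cases h : q.1 = t <;> simp [pvModify, pvMem, h] at ih ⊢ <;> simp [ih]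

theorem pvModify_append_of_ne {α : Type} (t u : String) (h : u ≠ t) (f : α → α) (d : List (String × α)) (v : α) :
    pvModify t f (d ++ [(u, v)]) = pvModify t f d ++ [(u, v)] := by
  induction d with
  | nil => simp [pvModify, h]
  | cons q rest ih =>
    by_cases hq : q.1 = t <;> simp [pvModify, hq, ih]

theorem pvModify_append_self {α : Type} (t : String) (d : List (String × α)) (h : pvMem t d = false) (f : α → α) (v : α) :
    pvModify t f (d ++ [(t, v)]) = d ++ [(t, f v)] := by
  induction d with
  | nil => simp [pvModify]
  | cons q rest ih =>
    simp [pvMem] at h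
    simp [pvModify, h.1, ih (by simp [pvMem]; intro x hx; exact (h.2 x hx))]

theorem pvModify_comm {α : Type} (t u : String) (h : u ≠ t) (f g : α → α) (d : List (String × α)) :
    pvModify u f (pvModify t g d) = pvModify t g (pvModify u f d) := by
  induction d with
  | nil => rfl
  | cons q rest ih =>
    by_cases hq : q.1 = t
    · have hqu : ¬ q.1 = u := by rw [hq]; exact fun e => h e.symm
      have htu : ¬ t = u := fun e => h e.symm
      simp [pvModify, hq, htu]
    · by_cases hu : q.1 = u
      · simp [pvModify, hu, h]
      · simp [pvModify, hq, hu, ih]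

theorem pvModify_modify_self {α : Type} (t : String) (f g : α → α) (d : List (String × α)) :
    pvModify t f (pvModify t g d) = pvModify t (fun x => f (g x)) d := by
  induction d with
  | nil => rfl
  | cons q rest ih =>
    by_cases hq : q.1 = t <;> simp [pvModify, hq, ih]

theorem pvBump_bumpBy (k : Int) (l : List Int) : pvBump (pvBumpBy k l) = pvBumpBy (k + 1) l := by
  rcases l with _ | ⟨a, _ | ⟨b, r⟩⟩ <;> simp [pvBump, pvBumpBy] <;> ring

theorem pvMStep_pos (s : List (String × List Int) × Int) (e : String × Int)
    (hm : pvMem e.1 s.1 = true) : pvMStep s e = (pvModify e.1 (pvBumpBy e.2) s.1, s.2) := by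
  simp [pvMStep, hm]

theorem pvMStep_neg (s : List (String × List Int) × Int) (e : String × Int)
    (hm : ¬ pvMem e.1 s.1 = true) : pvMStep s e = (s.1 ++ [(e.1, [s.2, e.2])], s.2 + 1) := by
  simp [pvMStep, hm]

-- one value-bump of key t commutes with an mstep on a different key
theorem pvMStep_phi (u t : String) (k : Int) (h : u ≠ t) (s : List (String × List Int) × Int) :
    pvMStep (pvModify t pvBump s.1, s.2) (u, k)
      = (pvModify t pvBump (pvMStep s (u, k)).1, (pvMStep s (u, k)).2) := by
  unfold pvMStep
  simp only [pvMem_modify]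
  by_cases hm : pvMem u s.1 = true
  · simp [hm, pvModify_comm t u h]
  · simp [hm, pvModify_append_of_ne t u h]

-- … and with a whole merge over keys distinct from t
theorem pv_foldl_mstep_phi (t : String) (rest : List (String × Int)) (h : ∀ e ∈ rest, e.1 ≠ t)
    (s : List (String × List Int) × Int) :
    rest.foldl pvMStep (pvModify t pvBump s.1, s.2)
      = (pvModify t pvBump ((rest.foldl pvMStep s).1), (rest.foldl pvMStep s).2) := by
  induction rest generalizing s with
  | nil => rfl
  | cons e rest ih =>
    have he : e.1 ≠ t := h e (by simp)
    have := pvMStep_phi e.1 t e.2 he s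
    simp only [List.foldl_cons]
    rw [show (e.1, e.2) = e from rfl] at this
    rw [this, ih (fun x hx => h x (by simp [hx]))]

theorem pvMem_mstep (t : String) (e : String × Int) (s : List (String × List Int) × Int)
    (h : pvMem t s.1 = true) : pvMem t (pvMStep s e).1 = true := by
  by_cases hm : pvMem e.1 s.1 = true
  · rw [pvMStep_pos s e hm]
    simpa [pvMem_modify] using h
  · rw [pvMStep_neg s e hm]
    simp [pvMem, List.any_append] at h ⊢
    exact Or.inl h

theorem pv_foldl_mstep_mem (t : String) (c : List (String × Int)) :
    ∀ s : List (String × List Int) × Int, pvMem t s.1 = true → pvMem t ((c.foldl pvMStep s).1) = true := by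
  induction c with
  | nil => intro s h; exact h
  | cons e rest ih => intro s h; exact ih _ (pvMem_mstep t e s h)

-- if t is a counter key, after merging t is a dict key
theorem pv_foldl_mstep_mem_of_key (t : String) (c : List (String × Int)) :
    ∀ s : List (String × List Int) × Int, pvMem t c = true → pvMem t ((c.foldl pvMStep s).1) = true := by
  induction c with
  | nil => intro s h; simp [pvMem] at h
  | cons e rest ih =>
    intro s h
    by_cases he : e.1 = t
    · simp only [List.foldl_cons]
      apply pv_foldl_mstep_mem
      by_cases hm : pvMem e.1 s.1 = true
      · rw [pvMStep_pos s e hm]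
        simp only [pvMem_modify]
        rw [← he]; exact hm
      · rw [pvMStep_neg s e hm]
        simp [pvMem, List.any_append, he]
    · simp only [List.foldl_cons]
      apply ih
      simp only [pvMem, List.any_cons, Bool.or_eq_true, beq_iff_eq] at h
      rcases h with h1 | h2
      · exact absurd h1 he
      · exact h2

-- bumping key t's count in the counter = merging, then one more occurrence of t
theorem pv_cbump (t : String) (c : List (String × Int)) :
    (c.map Prod.fst).Nodup → pvMem t c = true → ∀ s : List (String × List Int) × Int,
    (pvModify t (· + 1) c).foldl pvMStep s
      = (pvModify t pvBump ((c.foldl pvMStep s).1), (c.foldl pvMStep s).2) := by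
  induction c with
  | nil => intro _ hmem; simp [pvMem] at hmem
  | cons e rest ih =>
    intro hnd hmem s
    simp only [List.map_cons, List.nodup_cons] at hnd
    by_cases he : e.1 = t
    · have hnr : ∀ x ∈ rest, x.1 ≠ t := by
        intro x hx hxt
        apply hnd.1
        have hmm : x.1 ∈ rest.map Prod.fst := List.mem_map_of_mem hx
        rwa [hxt, ← he] at hmm
      have hstep : pvMStep s (e.1, e.2 + 1) = (pvModify t pvBump ((pvMStep s e).1), (pvMStep s e).2) := by
        by_cases hm : pvMem e.1 s.1 = true
        · have hfb : (fun x => pvBump (pvBumpBy e.2 x)) = pvBumpBy (e.2 + 1) := by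
            funext l; exact pvBump_bumpBy e.2 l
          rw [pvMStep_pos s e hm, pvMStep_pos s (e.1, e.2 + 1) hm]
          rw [he] at *
          rw [pvModify_modify_self, hfb]
        · rw [pvMStep_neg s e hm, pvMStep_neg s (e.1, e.2 + 1) hm]
          rw [he] at *
          rw [pvModify_append_self t s.1 (by simpa using hm) pvBump [s.2, e.2]]
          simp [pvBump]
      have hmod : pvModify t (· + 1) (e :: rest) = (e.1, e.2 + 1) :: rest := by
        simp [pvModify, he]
      rw [hmod]
      simp only [List.foldl_cons]
      rw [hstep]
      exact pv_foldl_mstep_phi t rest hnr (pvMStep s e)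
    · have hmem2 : pvMem t rest = true := by
        simp only [pvMem, List.any_cons, Bool.or_eq_true, beq_iff_eq] at hmem
        rcases hmem with h1 | h2
        · exact absurd h1 he
        · exact h2
      have hmod : pvModify t (· + 1) (e :: rest) = e :: pvModify t (· + 1) rest := by
        simp [pvModify, he]
      rw [hmod]
      simp only [List.foldl_cons]
      exact ih hnd.2 hmem2 (pvMStep s e)

-- counter keys stay distinct
theorem pvModify_keys {α : Type} (t : String) (f : α → α) (d : List (String × α)) :
    (pvModify t f d).map Prod.fst = d.map Prod.fst := by
  induction d with
  | nil => rfl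
  | cons q rest ih => by_cases hq : q.1 = t <;> simp [pvModify, hq, ih]

theorem pv_cstep_nodup (c : List (String × Int)) (tok : String) (h : (c.map Prod.fst).Nodup) :
    ((pvCStep c tok).map Prod.fst).Nodup := by
  by_cases h0 : PySem.Str.strip tok = ""
  · simpa [pvCStep, h0] using h
  · by_cases hm : pvMem (PySem.Str.strip tok) c = true
    · simpa [pvCStep, h0, hm, pvModify_keys] using h
    · have hnotin : PySem.Str.strip tok ∉ c.map Prod.fst := by
        intro hc
        rcases List.mem_map.mp hc with ⟨x, hx, hx1⟩
        apply hm
        simp only [pvMem, List.any_eq_true]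
        exact ⟨x, hx, by simp [hx1]⟩
      simp [pvCStep, h0, hm, List.nodup_append, h]
      intro a x hax ha
      exact hnotin (by rw [← ha]; exact List.mem_map_of_mem hax)

theorem pv_counter_nodup (E : List String) (c : List (String × Int)) (h : (c.map Prod.fst).Nodup) :
    ((E.foldl pvCStep c).map Prod.fst).Nodup := by
  induction E generalizing c with
  | nil => exact h
  | cons tok rest ih => exact ih _ (pv_cstep_nodup c tok h)

-- MAIN: one-at-a-time updates = aggregated-counter merge
theorem pv_main (E : List String) :
    ∀ s : List (String × List Int) × Int,
      E.foldl pvAStep s = (E.foldl pvCStep []).foldl pvMStep s := by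
  induction E using List.reverseRecOn with
  | nil => intro s; rfl
  | append_singleton E tok ih =>
    intro s
    rw [List.foldl_append, List.foldl_append, ih s]
    set cE := E.foldl pvCStep [] with hcE
    simp only [List.foldl_cons, List.foldl_nil]
    unfold pvAStep pvCStep
    by_cases h0 : PySem.Str.strip tok = ""
    · simp [h0]
    · simp only [if_neg h0]
      set t := PySem.Str.strip tok with ht
      by_cases hm : pvMem t cE = true
      · rw [if_pos hm,
            pv_cbump t cE (pv_counter_nodup E [] (by simp)) hm s]
        rw [if_pos (pv_foldl_mstep_mem_of_key t cE s hm)]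
      · rw [if_neg hm, List.foldl_append, List.foldl_cons, List.foldl_nil]
        unfold pvMStep
        have : pvBumpBy 1 = pvBump := by funext l; rfl
        simp [this]

-- ===== VERDICT (by name: the statement is the Claim_ definition above) =====
theorem gloss_dict_update_spec : Claim_equal_gloss_dict_update := by
  intro total_dict info_dict _ _
  unfold Spec_gloss_dict_update gloss_dict_update gloss_dict_update_alt
  rw [pv_foldl_nested pvAStep, pv_foldl_nested pvCStep, pv_main]
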